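-- pv_equiv track=rewrite | github.com/ygong15/lai-hmm-chr21 | scripts/plot_truth_vs_pred.py | compress_segments
-- ===== SOURCE A (Python) =====
-- def compress_segments(pos_state_list):
--     if not pos_state_list:
--         return []
--     segs = []
--     cur_state = pos_state_list[0][1]
--     start = pos_state_list[0][0]
--     prev = pos_state_list[0][0]
--     for pos, state in pos_state_list[1:]:
--         if state != cur_state:
--             segs.append((start, prev, cur_state))
--             cur_state = state
--             start = pos
--         prev = pos
--     segs.append((start, prev, cur_state))
--     return segs
-- ===== SOURCE B (Python) =====
-- def compress_segments(pos_state_list):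
--     segs = []
--     for pos, state in reversed(pos_state_list):
--         if segs and segs[0][2] == state:
--             segs[0] = (pos, segs[0][1], state)
--         else:
--             segs.insert(0, (pos, pos, state))
--     return segs
-- ===== Notes on version B (the rewrite author's own statement) =====
-- stated objective: alternative
-- what changed: Replaces A's forward state machine (cur_state/start/prev carried across the loop plus a final flush) with a right-to-left fold that builds the output back-to-front, merging each element into the current head segment or prepending a fresh singleton segment; no auxiliary state variables and no final append.
import Mathlib
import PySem

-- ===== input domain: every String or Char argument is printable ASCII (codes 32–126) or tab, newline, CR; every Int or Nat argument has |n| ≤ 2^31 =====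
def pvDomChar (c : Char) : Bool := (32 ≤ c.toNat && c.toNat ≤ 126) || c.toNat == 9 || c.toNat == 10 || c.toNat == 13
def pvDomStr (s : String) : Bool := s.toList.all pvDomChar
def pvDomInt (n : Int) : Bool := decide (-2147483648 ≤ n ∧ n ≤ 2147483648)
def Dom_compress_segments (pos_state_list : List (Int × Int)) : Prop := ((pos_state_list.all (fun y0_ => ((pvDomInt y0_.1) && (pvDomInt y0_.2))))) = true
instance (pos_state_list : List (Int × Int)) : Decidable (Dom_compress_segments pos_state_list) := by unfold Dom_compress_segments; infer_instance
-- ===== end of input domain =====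

-- B builds the segment list back-to-front with a right fold, merging into the head segment, instead of A's forward cur_state/start/prev state machine; objective: alternative decomposition, same cost.


-- ===== PORT A =====
-- A's loop body: state (segs, cur_state, start, prev)
def stepA (acc : List (Int × Int × Int) × Int × Int × Int) (ps : Int × Int) :
    List (Int × Int × Int) × Int × Int × Int :=
  if ps.2 ≠ acc.2.1 then (acc.1 ++ [(acc.2.2.1, acc.2.2.2, acc.2.1)], ps.2, ps.1, ps.1)
  else (acc.1, acc.2.1, acc.2.2.1, ps.1)

def compress_segments (pos_state_list : List (Int × Int)) : List (Int × Int × Int) :=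
  match pos_state_list with
  | [] => []
  | (p0, s0) :: rest =>
    let r := rest.foldl stepA ([], s0, p0, p0)
    r.1 ++ [(r.2.2.1, r.2.2.2, r.2.1)]

-- ===== PORT B =====
-- B's loop body over reversed(pos_state_list): merge into the head segment or insert a new one at the front.
-- The reversed loop with insert(0, …) is ported as List.foldr (exact).
def stepB (ps : Int × Int) (segs : List (Int × Int × Int)) : List (Int × Int × Int) :=
  match segs with
  | (a, b, st) :: rest =>
    if st == ps.2 then (ps.1, b, st) :: rest
    else (ps.1, ps.1, ps.2) :: (a, b, st) :: rest
  | [] => [(ps.1, ps.1, ps.2)]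

def compress_segments_alt (pos_state_list : List (Int × Int)) : List (Int × Int × Int) :=
  pos_state_list.foldr stepB []

-- ===== PRECONDITION & SPEC =====
def Spec_compress_segments (pos_state_list : List (Int × Int)) (out : List (Int × Int × Int)) : Prop := out = compress_segments_alt pos_state_list
instance (pos_state_list : List (Int × Int)) (out : List (Int × Int × Int)) : Decidable (Spec_compress_segments pos_state_list out) := by unfold Spec_compress_segments; infer_instance

-- ===== CLAIM (what is proved, stated in full; the proofs are below) =====
def Claim_equal_compress_segments : Prop := ∀ (pos_state_list : List (Int × Int)), Dom_compress_segments pos_state_list → Spec_compress_segments pos_state_list (compress_segments pos_state_list)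

-- ===== LEMMAS AND PROOFS =====

-- common characterisation: peel one maximal run of equal states at a time
def spanRun (state last : Int) : List (Int × Int) → Int × List (Int × Int)
  | [] => (last, [])
  | (p, s) :: t => if s == state then spanRun state p t else (last, (p, s) :: t)

theorem spanRun_len (state last : Int) (t : List (Int × Int)) :
    (spanRun state last t).2.length ≤ t.length := by
  induction t generalizing last with
  | nil => simp [spanRun]
  | cons h t ih =>
    obtain ⟨p, s⟩ := h
    simp only [spanRun]
    split
    · exact Nat.le_trans (ih p) (Nat.le_succ _)
    · simp

def runSpec (pos_state_list : List (Int × Int)) : List (Int × Int × Int) :=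
  match pos_state_list with
  | [] => []
  | (start, state) :: t =>
    let r := spanRun state start t
    (start, r.1, state) :: runSpec r.2
termination_by pos_state_list.length
decreasing_by
  simp only [List.length_cons]
  exact Nat.lt_succ_of_le (spanRun_len state start t)


theorem runSpec_eq (p s : Int) (t : List (Int × Int)) :
    runSpec ((p, s) :: t) = (p, (spanRun s p t).1, s) :: runSpec (spanRun s p t).2 := by
  rw [runSpec]

-- ---- A equals runSpec ----
-- the segs accumulator only ever grows on the right; the rest of the state ignores it
theorem foldA_factor (t : List (Int × Int)) (segs : List (Int × Int × Int)) (c st pr : Int) :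
    t.foldl stepA (segs, c, st, pr) =
      (segs ++ (t.foldl stepA ([], c, st, pr)).1, (t.foldl stepA ([], c, st, pr)).2) := by
  induction t generalizing segs c st pr with
  | nil => simp
  | cons h t ih =>
    obtain ⟨p, s⟩ := h
    simp only [List.foldl_cons, stepA]
    split
    · simp only [List.nil_append]
      rw [ih (segs ++ [(st, pr, c)]), ih [(st, pr, c)]]
      simp
    · exact ih segs c st p

-- A's remaining loop (from state (c, st, pr), empty segs) emits exactly runSpec's segments
theorem loop_eq (t : List (Int × Int)) (c st pr : Int) :
    (t.foldl stepA ([], c, st, pr)).1 ++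
      [((t.foldl stepA ([], c, st, pr)).2.2.1, (t.foldl stepA ([], c, st, pr)).2.2.2,
        (t.foldl stepA ([], c, st, pr)).2.1)] =
      (st, (spanRun c pr t).1, c) :: runSpec (spanRun c pr t).2 := by
  induction t generalizing c st pr with
  | nil => simp [spanRun, runSpec]
  | cons h t ih =>
    obtain ⟨p, s⟩ := h
    simp only [List.foldl_cons, stepA, spanRun]
    by_cases hs : s = c
    · simp only [hs, ne_eq, not_true_eq_false, if_false, beq_self_eq_true, if_true]
      exact ih c st p
    · have hb : (s == c) = false := by simp [hs]
      simp only [ne_eq, hs, not_false_eq_true, if_true, hb, Bool.false_eq_true, if_false,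
        List.nil_append]
      rw [foldA_factor t [(st, pr, c)] s p p]
      simp only [List.cons_append, List.nil_append]
      rw [ih s p p]
      rw [runSpec_eq]

theorem A_eq_runSpec (l : List (Int × Int)) : compress_segments l = runSpec l := by
  match l with
  | [] => simp [compress_segments, runSpec]
  | (p0, s0) :: rest =>
    rw [compress_segments]
    rw [runSpec_eq]
    exact loop_eq rest s0 p0 p0

-- ---- B equals runSpec ----
-- runSpec satisfies B's right-fold recurrence
theorem runSpec_cons (p s : Int) (t : List (Int × Int)) :
    runSpec ((p, s) :: t) = stepB (p, s) (runSpec t) := by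
  match t with
  | [] => simp [runSpec, spanRun, stepB]
  | (q, u) :: t' =>
    by_cases hu : u = s
    · subst hu
      rw [runSpec_eq]
      rw [runSpec_eq]
      simp [spanRun, stepB]
    · have hb : (u == s) = false := by simp [hu]
      rw [runSpec_eq]
      rw [runSpec_eq]
      simp only [spanRun, hb, Bool.false_eq_true, if_false, stepB]
      rw [runSpec_eq]

theorem B_eq_runSpec (l : List (Int × Int)) : compress_segments_alt l = runSpec l := by
  induction l with
  | nil => simp [compress_segments_alt, runSpec]
  | cons h t ih =>
    obtain ⟨p, s⟩ := h
    rw [compress_segments_alt, List.foldr_cons, runSpec_cons]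
    rw [show t.foldr stepB [] = compress_segments_alt t from rfl, ih]

-- ===== VERDICT (by name: the statement is the Claim_ definition above) =====
theorem compress_segments_spec : Claim_equal_compress_segments := by
  intro l _
  unfold Spec_compress_segments
  rw [A_eq_runSpec, B_eq_runSpec]
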